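-- pv_equiv track=rewrite | github.com/titomerino/parkops | parking/utils.py | format_plate
-- ===== SOURCE A (Python) =====
-- def format_plate(plate: str) -> str:
--     """
--     Formatea una placa así:
--     - Primera letra sola
--     - El resto agrupado de derecha a izquierda en bloques de 3
--
--     Ej:
--     P40807  -> P 40 807
--     P8E98   -> P 8 E98
--     P911116 -> P 911 116
--     """
--
--     if not plate:
--         return ""
--
--     plate = plate.strip().upper()
--
--     if len(plate) <= 1:
--         return plate
--
--     first = plate[0]
--     rest = plate[1:]
--
--     # Calcular tamaño del primer grupo (lo que sobra al dividir entre 3)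
--     remainder = len(rest) % 3
--
--     groups = []
--
--     if remainder:
--         groups.append(rest[:remainder])
--
--     for i in range(remainder, len(rest), 3):
--         groups.append(rest[i:i+3])
--
--     return f"{first} {' '.join(groups)}"
-- ===== SOURCE B (Python) =====
-- def format_plate(plate: str) -> str:
--     if not plate:
--         return ""
--
--     plate = plate.strip().upper()
--
--     if len(plate) <= 1:
--         return plate
--
--     first = plate[0]
--     rest = plate[1:]
--
--     # Collect blocks of 3 from the right end, then reverse.
--     groups = []
--     i = len(rest)
--     while i > 0:
--         groups.append(rest[max(0, i - 3):i])
--         i -= 3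
--     groups.reverse()
--
--     return f"{first} {' '.join(groups)}"
-- ===== Notes on version B (the rewrite author's own statement) =====
-- stated objective: alternative
-- what changed: Instead of computing len(rest) % 3 and scanning forward with range(remainder, len(rest), 3), B walks a decrementing index from the right end, slicing rest[max(0, i-3):i] per step, and reverses the collected blocks before joining.
import Mathlib
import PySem

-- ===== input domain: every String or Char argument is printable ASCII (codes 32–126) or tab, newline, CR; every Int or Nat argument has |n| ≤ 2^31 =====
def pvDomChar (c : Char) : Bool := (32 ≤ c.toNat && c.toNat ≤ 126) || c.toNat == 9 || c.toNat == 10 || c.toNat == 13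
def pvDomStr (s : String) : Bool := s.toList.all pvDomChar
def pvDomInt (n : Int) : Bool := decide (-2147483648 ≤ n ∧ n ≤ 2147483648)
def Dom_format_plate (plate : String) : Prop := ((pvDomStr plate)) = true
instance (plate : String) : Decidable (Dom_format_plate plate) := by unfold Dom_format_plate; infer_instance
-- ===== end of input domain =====

-- B builds the blocks right-to-left with a decrementing index and reverses, instead of A's
-- modulo-sized head group plus a forward range(…, 3) scan (objective: alternative decomposition).


-- ===== PORT A =====
def format_plate (plate : String) : String :=
  if plate = "" then ""
  else
    let p := PySem.Chars.upper (PySem.Chars.strip plate.toList)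
    if p.length ≤ 1 then String.mk p
    else
      match p with
      | [] => ""        -- unreachable: p.length ≥ 2 here
      | first :: rest =>
        let remainder : Int := PySem.Int.mod (rest.length : Int) 3
        let groups : List (List Char) :=
          if remainder ≠ 0 then [PySem.List.slice rest none (some remainder)] else []
        let groups :=
          (PySem.List.pyRange remainder (rest.length : Int) 3).foldl
            (fun gs i => gs ++ [PySem.List.slice rest (some i) (some (i + 3))]) groups
        String.mk (first :: ' ' :: PySem.Chars.join [' '] groups)

-- ===== PORT B =====
-- the while loop of Source B: append rest[max(0, i-3):i], decrement i by 3
def pvAltLoop (rest : List Char) (i : Int) (groups : List (List Char)) : List (List Char) :=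
  if 0 < i then
    pvAltLoop rest (i - 3) (groups ++ [PySem.List.slice rest (some (max 0 (i - 3))) (some i)])
  else groups
termination_by i.toNat
decreasing_by omega

def format_plate_alt (plate : String) : String :=
  if plate = "" then ""
  else
    let p := PySem.Chars.upper (PySem.Chars.strip plate.toList)
    if p.length ≤ 1 then String.mk p
    else
      match p with
      | [] => ""        -- unreachable: p.length ≥ 2 here
      | first :: rest =>
        let groups := (pvAltLoop rest (rest.length : Int) []).reverse
        String.mk (first :: ' ' :: PySem.Chars.join [' '] groups)

-- ===== PRECONDITION & SPEC =====
def Spec_format_plate (plate : String) (out : String) : Prop := out = format_plate_alt plate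
instance (plate : String) (out : String) : Decidable (Spec_format_plate plate out) := by unfold Spec_format_plate; infer_instance

-- ===== CLAIM (what is proved, stated in full; the proofs are below) =====
def Claim_equal_format_plate : Prop := ∀ (plate : String), Dom_format_plate plate → Spec_format_plate plate (format_plate plate)

-- ===== LEMMAS AND PROOFS =====

lemma pvAltLoop_acc (rest : List Char) :
    ∀ (k : Nat) (i : Int), i.toNat = k → ∀ acc,
      pvAltLoop rest i acc = acc ++ pvAltLoop rest i [] := by
  intro k
  induction k using Nat.strong_induction_on with
  | _ k ih =>
    intro i hk acc
    by_cases hi : 0 < i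
    · rw [pvAltLoop, if_pos hi]
      conv_rhs => rw [pvAltLoop, if_pos hi]
      rw [ih (i - 3).toNat (by omega) (i - 3) rfl
            (acc ++ [PySem.List.slice rest (some (max 0 (i - 3))) (some i)])]
      simp only [List.nil_append]
      rw [ih (i - 3).toNat (by omega) (i - 3) rfl
            ([PySem.List.slice rest (some (max 0 (i - 3))) (some i)])]
      simp
    · rw [pvAltLoop, if_neg hi]
      conv_rhs => rw [pvAltLoop, if_neg hi]
      simp

-- range(r, n, 3) with r = n % 3 gains its last element n-3 at the right end
lemma pvRange3_snoc (n : Nat) (h : 3 < n) :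
    PySem.List.pyRange ((n % 3 : Nat) : Int) (n : Int) 3
      = PySem.List.pyRange ((n % 3 : Nat) : Int) ((n - 3 : Nat) : Int) 3 ++ [((n - 3 : Nat) : Int)] := by
  rw [PySem.List.pyRange_of_pos _ _ (by norm_num), PySem.List.pyRange_of_pos _ _ (by norm_num)]
  have h1 : (if ((n % 3 : Nat) : Int) < (n : Int) then
      (((n : Int) - ((n % 3 : Nat) : Int) + 3 - 1) / 3).toNat else 0) = n / 3 := by
    rw [if_pos (by omega)]; omega
  have h2 : (if ((n % 3 : Nat) : Int) < ((n - 3 : Nat) : Int) then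
      ((((n - 3 : Nat) : Int) - ((n % 3 : Nat) : Int) + 3 - 1) / 3).toNat else 0) = n / 3 - 1 := by
    by_cases hc : ((n % 3 : Nat) : Int) < ((n - 3 : Nat) : Int)
    · rw [if_pos hc]; omega
    · rw [if_neg hc]; omega
  rw [h1, h2]
  have h3 : n / 3 = (n / 3 - 1) + 1 := by omega
  rw [h3, List.range_succ, List.map_append]
  simp only [List.map_cons, List.map_nil]
  congr 2
  show ((n % 3 : Nat) : Int) + 3 * ((n / 3 - 1 : Nat) : Int) = ((n - 3 : Nat) : Int)
  omega

lemma pvAltLoop_eq (rest : List Char) : ∀ (n : Nat), 0 < n →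
    (pvAltLoop rest (n : Int) []).reverse
      = (if ((n % 3 : Nat) : Int) ≠ 0 then
            [PySem.List.slice rest none (some ((n % 3 : Nat) : Int))] else [])
        ++ (PySem.List.pyRange ((n % 3 : Nat) : Int) (n : Int) 3).map
            (fun i => PySem.List.slice rest (some i) (some (i + 3))) := by
  intro n
  induction n using Nat.strong_induction_on with
  | _ n ih =>
    intro hn
    rw [pvAltLoop, if_pos (by omega : (0:Int) < (n : Int)),
        pvAltLoop_acc rest ((n:Int) - 3).toNat _ rfl]
    by_cases h3 : n ≤ 3
    · -- last (leftmost) block: the loop stops after this step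
      rw [pvAltLoop, if_neg (by omega : ¬ (0:Int) < (n : Int) - 3)]
      have hmax : max 0 ((n : Int) - 3) = 0 := by omega
      interval_cases n
      · norm_num [hmax, PySem.List.pyRange_of_pos]
      · norm_num [hmax, PySem.List.pyRange_of_pos]
      · have : ((3:Nat) % 3 : Nat) = 0 := by norm_num
        norm_num [hmax, PySem.List.pyRange_of_pos, this]
    · -- 3 < n: peel the rightmost block and use the IH at n - 3
      have hsub : (n : Int) - 3 = ((n - 3 : Nat) : Int) := by omega
      have hmax : max 0 ((n : Int) - 3) = ((n - 3 : Nat) : Int) := by omega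
      have hmod : (n - 3) % 3 = n % 3 := by omega
      rw [hmax, hsub, List.reverse_append,
          ih (n - 3) (by omega) (by omega), hmod,
          pvRange3_snoc n (by omega), List.map_append]
      simp only [List.map_cons, List.map_nil, List.reverse_cons, List.reverse_nil,
        List.nil_append, List.append_assoc]
      rw [show ((n - 3 : Nat) : Int) + 3 = (n : Int) from by omega]

-- the two group lists coincide for a nonempty rest
lemma pvGroups_eq (rest : List Char) (h : 0 < rest.length) :
    (PySem.List.pyRange (PySem.Int.mod (rest.length : Int) 3) (rest.length : Int) 3).foldl
        (fun gs i => gs ++ [PySem.List.slice rest (some i) (some (i + 3))])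
        (if PySem.Int.mod (rest.length : Int) 3 ≠ 0 then
            [PySem.List.slice rest none (some (PySem.Int.mod (rest.length : Int) 3))] else [])
      = (pvAltLoop rest (rest.length : Int) []).reverse := by
  have hmod : PySem.Int.mod (rest.length : Int) 3 = ((rest.length % 3 : Nat) : Int) := by
    rw [PySem.Int.mod_eq_emod_of_pos (by norm_num : (0:Int) < 3)]
    omega
  rw [hmod, PySem.List.foldl_append_singleton_eq_map, pvAltLoop_eq rest rest.length h]

-- ===== VERDICT (by name: the statement is the Claim_ definition above) =====
theorem format_plate_spec : Claim_equal_format_plate := by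
  intro plate _
  unfold Spec_format_plate format_plate format_plate_alt
  by_cases hp : plate = ""
  · simp [hp]
  · simp only [hp, if_false]
    by_cases hl : (PySem.Chars.upper (PySem.Chars.strip plate.toList)).length ≤ 1
    · simp [hl]
    · simp only [hl, if_false]
      cases hpe : PySem.Chars.upper (PySem.Chars.strip plate.toList) with
      | nil => simp [hpe] at hl
      | cons first rest =>
        rw [hpe] at hl
        simp only []
        rw [pvGroups_eq rest (by simp only [List.length_cons] at hl; omega)]
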